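-- pv_equiv track=rewrite | github.com/kartheekvikash/Algorithms | Greedy_TSM_Problem.py | arrange_pyramid_points
-- ===== SOURCE A (Python) =====
-- def arrange_pyramid_points(points, canvas_width, canvas_height):
--     pyramid_levels = len(points)
--     arranged_points = []
--
--     spacing_x = canvas_width // (pyramid_levels + 1)
--     spacing_y = canvas_height // (pyramid_levels + 1)
--
--     index = 0
--     for level in range(1, pyramid_levels + 1):
--         row_points = []
--         for i in range(level):
--             if index < len(points):
--                 x = spacing_x * (i + 1) + (canvas_width // 2 - level * spacing_x // 2)
--                 y = level * spacing_y
--                 row_points.append((x, y))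
--                 index += 1
--         arranged_points.extend(row_points)
--
--     return arranged_points
-- ===== SOURCE B (Python) =====
-- import math
--
-- def arrange_pyramid_points(points, canvas_width, canvas_height):
--     n = len(points)
--     spacing_x = canvas_width // (n + 1)
--     spacing_y = canvas_height // (n + 1)
--     out = []
--     for k in range(n):
--         level = (math.isqrt(8 * k + 1) - 1) // 2 + 1
--         i = k - level * (level - 1) // 2
--         x = spacing_x * (i + 1) + (canvas_width // 2 - level * spacing_x // 2)
--         out.append((x, level * spacing_y))
--     return out
-- ===== Notes on version B (the rewrite author's own statement) =====
-- stated objective: alternative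
-- what changed: A's nested level/position loops with a running global-index guard are replaced by a single flat pass over all point indices that recovers each point's row and in-row position by inverting triangular numbers with math.isqrt.
import Mathlib
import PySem

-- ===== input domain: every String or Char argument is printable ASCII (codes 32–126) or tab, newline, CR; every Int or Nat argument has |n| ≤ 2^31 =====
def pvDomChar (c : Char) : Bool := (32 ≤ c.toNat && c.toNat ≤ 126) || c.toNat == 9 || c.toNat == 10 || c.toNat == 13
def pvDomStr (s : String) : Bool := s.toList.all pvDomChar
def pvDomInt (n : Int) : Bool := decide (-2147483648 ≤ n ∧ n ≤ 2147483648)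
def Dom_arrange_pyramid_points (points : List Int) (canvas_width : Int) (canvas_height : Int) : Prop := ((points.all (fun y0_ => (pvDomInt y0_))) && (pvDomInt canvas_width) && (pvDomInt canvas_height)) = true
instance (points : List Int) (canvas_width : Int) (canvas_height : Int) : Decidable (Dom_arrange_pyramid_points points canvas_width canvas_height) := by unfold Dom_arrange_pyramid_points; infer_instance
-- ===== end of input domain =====

-- B replaces A's nested level/position loops (with a running global-index guard) by one flat
-- pass over all point indices, recovering each point's pyramid row by inverting the triangular
-- numbers with math.isqrt (objective: alternative decomposition).

-- ===== PORT A =====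
def arrange_pyramid_points (points : List Int) (canvas_width : Int) (canvas_height : Int) : List (Int × Int) :=
  let pyramid_levels : Int := (points.length : Int)
  let spacing_x := PySem.Int.floordiv canvas_width (pyramid_levels + 1)
  let spacing_y := PySem.Int.floordiv canvas_height (pyramid_levels + 1)
  let st := (PySem.List.pyRange 1 (pyramid_levels + 1) 1).foldl
    (fun (st : List (Int × Int) × Int) level =>
      let inner := (PySem.List.pyRange 0 level 1).foldl
        (fun (rs : List (Int × Int) × Int) i =>
          if rs.2 < (points.length : Int) then
            let x := spacing_x * (i + 1) +
              (PySem.Int.floordiv canvas_width 2 - PySem.Int.floordiv (level * spacing_x) 2)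
            let y := level * spacing_y
            (rs.1 ++ [(x, y)], rs.2 + 1)
          else rs)
        (([] : List (Int × Int)), st.2)
      (st.1 ++ inner.1, inner.2))
    (([] : List (Int × Int)), (0 : Int))
  st.1

-- ===== PORT B =====
-- math.isqrt on a nonnegative int, ported as Lean's Nat.sqrt (exact: both are ⌊√n⌋).
def pyIsqrt (n : Int) : Int := (Nat.sqrt n.toNat : Int)

def arrange_pyramid_points_alt (points : List Int) (canvas_width : Int) (canvas_height : Int) : List (Int × Int) :=
  let n : Int := (points.length : Int)
  let spacing_x := PySem.Int.floordiv canvas_width (n + 1)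
  let spacing_y := PySem.Int.floordiv canvas_height (n + 1)
  (PySem.List.pyRange 0 n 1).foldl
    (fun (out : List (Int × Int)) k =>
      let level := PySem.Int.floordiv (pyIsqrt (8 * k + 1) - 1) 2 + 1
      let i := k - PySem.Int.floordiv (level * (level - 1)) 2
      let x := spacing_x * (i + 1) +
        (PySem.Int.floordiv canvas_width 2 - PySem.Int.floordiv (level * spacing_x) 2)
      out ++ [(x, level * spacing_y)])
    []

-- ===== PRECONDITION & SPEC =====
def Spec_arrange_pyramid_points (points : List Int) (canvas_width : Int) (canvas_height : Int) (out : List (Int × Int)) : Prop := out = arrange_pyramid_points_alt points canvas_width canvas_height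
instance (points : List Int) (canvas_width : Int) (canvas_height : Int) (out : List (Int × Int)) : Decidable (Spec_arrange_pyramid_points points canvas_width canvas_height out) := by unfold Spec_arrange_pyramid_points; infer_instance

-- ===== CLAIM (what is proved, stated in full; the proofs are below) =====
def Claim_equal_arrange_pyramid_points : Prop := ∀ (points : List Int) (canvas_width : Int) (canvas_height : Int), Dom_arrange_pyramid_points points canvas_width canvas_height → Spec_arrange_pyramid_points points canvas_width canvas_height (arrange_pyramid_points points canvas_width canvas_height)

-- ===== LEMMAS AND PROOFS =====

-- L-th triangular number, as an integer.
def pvTri (L : ℕ) : Int := ((L : Int) * (L + 1)) / 2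

theorem pvTri_succ (L : ℕ) : pvTri (L + 1) = pvTri L + (L + 1) := by
  unfold pvTri
  have h : ((L : Int) + 1) * ((L : Int) + 1 + 1) = (L : Int) * (L + 1) + 2 * ((L : Int) + 1) := by ring
  push_cast
  omega

theorem pvTri_nonneg (L : ℕ) : 0 ≤ pvTri L := by
  induction L with
  | zero => unfold pvTri; norm_num
  | succ m ih => rw [pvTri_succ]; positivity

theorem pvTri_ge (L : ℕ) : (L : Int) ≤ pvTri L := by
  induction L with
  | zero => unfold pvTri; norm_num
  | succ m ih => rw [pvTri_succ]; push_cast; omega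

theorem pvTri_two (L : ℕ) : 2 * pvTri L = (L : Int) * ((L : Int) + 1) := by
  obtain ⟨m, hm⟩ := Int.even_mul_succ_self (L : Int)
  unfold pvTri
  omega

theorem pyIsqrt_spec (n : Int) (hn : 0 ≤ n) :
    0 ≤ pyIsqrt n ∧ pyIsqrt n * pyIsqrt n ≤ n ∧ n < (pyIsqrt n + 1) * (pyIsqrt n + 1) := by
  unfold pyIsqrt
  have h1 : Nat.sqrt n.toNat * Nat.sqrt n.toNat ≤ n.toNat := by
    have := Nat.sqrt_le' n.toNat
    simpa [pow_two] using this
  have h2 : n.toNat < (Nat.sqrt n.toNat + 1) * (Nat.sqrt n.toNat + 1) := by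
    have := Nat.lt_succ_sqrt' n.toNat
    simpa [pow_two, Nat.succ_eq_add_one] using this
  refine ⟨by positivity, ?_, ?_⟩ <;>
  · zify at h1 h2
    omega

-- Triangular-number inversion: for pvTri L ≤ k < pvTri (L+1), B's computed level is L+1.
theorem pvDecode_level (L : ℕ) (k : Int) (h1 : pvTri L ≤ k) (h2 : k < pvTri (L + 1)) :
    PySem.Int.floordiv (pyIsqrt (8 * k + 1) - 1) 2 + 1 = (L : Int) + 1 := by
  have hk : 0 ≤ k := le_trans (pvTri_nonneg L) h1
  obtain ⟨hs0, hs1, hs2⟩ := pyIsqrt_spec (8 * k + 1) (by omega)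
  set s := pyIsqrt (8 * k + 1) with hs
  have htL : 2 * pvTri L = (L : Int) * ((L : Int) + 1) := pvTri_two L
  have htL1 : 2 * pvTri (L + 1) = ((L : Int) + 1) * (((L : Int) + 1) + 1) := by
    have := pvTri_two (L + 1); push_cast at this ⊢; linarith
  have hlo : (2 * (L : Int) + 1) * (2 * (L : Int) + 1) ≤ 8 * k + 1 := by nlinarith
  have hhi : 8 * k + 1 < (2 * (L : Int) + 3) * (2 * (L : Int) + 3) := by nlinarith
  have hge : 2 * (L : Int) + 1 ≤ s := by nlinarith
  have hle : s ≤ 2 * (L : Int) + 2 := by nlinarith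
  rw [PySem.Int.floordiv_eq_ediv_of_pos (by norm_num)]
  omega

theorem pvDecode_tri (L : ℕ) :
    PySem.Int.floordiv (((L : Int) + 1) * ((L : Int) + 1 - 1)) 2 = pvTri L := by
  rw [PySem.Int.floordiv_eq_ediv_of_pos (by norm_num)]
  unfold pvTri
  have h : ((L : Int) + 1) * ((L : Int) + 1 - 1) = (L : Int) * (L + 1) := by ring
  rw [h]

-- B's per-index point function.
def pvQ (sx sy cw : Int) (k : Int) : Int × Int :=
  let level := PySem.Int.floordiv (pyIsqrt (8 * k + 1) - 1) 2 + 1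
  let i := k - PySem.Int.floordiv (level * (level - 1)) 2
  (sx * (i + 1) + (PySem.Int.floordiv cw 2 - PySem.Int.floordiv (level * sx) 2), level * sy)

-- A's per-row point function.
def pvP (sx sy cw : Int) (level i : Int) : Int × Int :=
  (sx * (i + 1) + (PySem.Int.floordiv cw 2 - PySem.Int.floordiv (level * sx) 2), level * sy)

theorem pvQ_eq_pvP (sx sy cw : Int) (L : ℕ) (k : Int)
    (h1 : pvTri L ≤ k) (h2 : k < pvTri (L + 1)) :
    pvQ sx sy cw k = pvP sx sy cw ((L : Int) + 1) (k - pvTri L) := by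
  simp only [pvQ, pvP]
  rw [pvDecode_level L k h1 h2, pvDecode_tri L]

-- A's inner loop in closed form.
theorem pvInner (sx sy cw N idx0 lvl : Int) (c : ℕ) :
    (PySem.List.pyRange 0 (c : Int) 1).foldl
      (fun (rs : List (Int × Int) × Int) i =>
        if rs.2 < N then (rs.1 ++ [pvP sx sy cw lvl i], rs.2 + 1) else rs)
      (([] : List (Int × Int)), idx0)
    = ((PySem.List.pyRange 0 ((min c (N - idx0).toNat : ℕ) : Int) 1).map (pvP sx sy cw lvl),
        idx0 + ((min c (N - idx0).toNat : ℕ) : Int)) := by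
  induction c with
  | zero => simp [PySem.List.pyRange_one_eq_nil]
  | succ m ih =>
    rw [show ((m + 1 : ℕ) : Int) = (m : Int) + 1 by push_cast; ring,
        PySem.List.pyRange_one_succ_right (by positivity), List.foldl_append, ih]
    simp only [List.foldl_cons, List.foldl_nil]
    by_cases h : m < (N - idx0).toNat
    · have hmin : min m (N - idx0).toNat = m := by omega
      have hmin' : min (m + 1) (N - idx0).toNat = m + 1 := by omega
      rw [hmin, hmin', if_pos (by omega)]
      rw [show ((m + 1 : ℕ) : Int) = (m : Int) + 1 by push_cast; ring,
          PySem.List.pyRange_one_succ_right (by positivity), List.map_append]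
      simp only [Prod.mk.injEq, List.map_cons, List.map_nil]
      exact ⟨trivial, by omega⟩
    · have hmin : min m (N - idx0).toNat = (N - idx0).toNat := by omega
      have hmin' : min (m + 1) (N - idx0).toNat = (N - idx0).toNat := by omega
      rw [hmin, hmin', if_neg (by omega)]

-- The outer loop invariant: after levels 1..L, the accumulator holds the first min(N, tri L)
-- points of B's flat enumeration, and the running index equals min(N, tri L).
theorem pvOuter (sx sy cw N : Int) (hN : 0 ≤ N) (L : ℕ) :
    (PySem.List.pyRange 1 ((L : Int) + 1) 1).foldl
      (fun (st : List (Int × Int) × Int) level =>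
        let inner := (PySem.List.pyRange 0 level 1).foldl
          (fun (rs : List (Int × Int) × Int) i =>
            if rs.2 < N then (rs.1 ++ [pvP sx sy cw level i], rs.2 + 1) else rs)
          (([] : List (Int × Int)), st.2)
        (st.1 ++ inner.1, inner.2))
      (([] : List (Int × Int)), (0 : Int))
    = ((PySem.List.pyRange 0 (min N (pvTri L)) 1).map (pvQ sx sy cw), min N (pvTri L)) := by
  induction L with
  | zero =>
    have h0 : pvTri 0 = 0 := by unfold pvTri; norm_num
    have hmin : min N (pvTri 0) = 0 := by omega
    rw [hmin]
    simp [PySem.List.pyRange_one_eq_nil (le_refl (1 : Int)),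
          PySem.List.pyRange_one_eq_nil (le_refl (0 : Int))]
  | succ L ih =>
    rw [show (((L + 1 : ℕ) : Int)) + 1 = ((L : Int) + 1) + 1 by push_cast; ring,
        PySem.List.pyRange_one_succ_right (by omega), List.foldl_append, ih]
    simp only [List.foldl_cons, List.foldl_nil]
    rw [show ((L : Int) + 1) = ((L + 1 : ℕ) : Int) by push_cast; ring]
    rw [pvInner sx sy cw N (min N (pvTri L)) ((L + 1 : ℕ) : Int) (L + 1)]
    have hTs : pvTri (L + 1) = pvTri L + ((L : Int) + 1) := by
      rw [pvTri_succ]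
    have hT0 : 0 ≤ pvTri L := pvTri_nonneg L
    set M := min N (pvTri L) with hMdef
    set m : ℕ := min (L + 1) ((N - M).toNat) with hmdef
    have hidx : M + (m : Int) = min N (pvTri (L + 1)) := by
      simp only [hmdef, hMdef]; push_cast; omega
    by_cases hc : N ≤ pvTri L
    · have hM : M = N := by omega
      have hm0 : m = 0 := by simp only [hmdef]; omega
      rw [hm0]
      simp only [Nat.cast_zero, PySem.List.pyRange_one_eq_nil (le_refl (0 : Int)),
        List.map_nil, List.append_nil]
      rw [← hidx, hm0]
      simp
    · have hM : M = pvTri L := by omega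
      rw [← hidx]
      have hsplit : PySem.List.pyRange 0 (M + (m : Int)) 1 =
          PySem.List.pyRange 0 M 1 ++ PySem.List.pyRange M (M + (m : Int)) 1 :=
        PySem.List.pyRange_one_append 0 M (M + (m : Int)) (by omega) (by omega)
      rw [hsplit, List.map_append]
      have hrow : List.map (pvQ sx sy cw) (PySem.List.pyRange M (M + (m : Int)) 1) =
          List.map (pvP sx sy cw ((L + 1 : ℕ) : Int)) (PySem.List.pyRange 0 ((m : Int)) 1) := by
        rw [PySem.List.pyRange_one M (M + (m : Int)), PySem.List.pyRange_one 0 ((m : Int))]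
        simp only [List.map_map]
        have hlen : ((M + (m : Int)) - M).toNat = m := by omega
        have hlen2 : (((m : Int)) - 0).toNat = m := by omega
        rw [hlen, hlen2]
        apply List.map_congr_left
        intro j hj
        have hj' : j < m := List.mem_range.mp hj
        have hjm : (j : Int) < (m : Int) := by exact_mod_cast hj'
        have hmle : (m : Int) ≤ (L : Int) + 1 := by
          have : m ≤ L + 1 := by omega
          exact_mod_cast this
        simp only [Function.comp]
        have hlevel : ((L + 1 : ℕ) : Int) = (L : Int) + 1 := by push_cast; ring
        have harg : M + (j : Int) - pvTri L = 0 + (j : Int) := by omega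
        rw [pvQ_eq_pvP sx sy cw L (M + (j : Int)) (by omega) (by omega), hlevel, harg]
      rw [hrow]
-- ===== VERDICT (by name: the statement is the Claim_ definition above) =====
theorem arrange_pyramid_points_spec : Claim_equal_arrange_pyramid_points := by
  intro points canvas_width canvas_height _hdom
  unfold Spec_arrange_pyramid_points
  have hN : (0 : Int) ≤ (points.length : Int) := by positivity
  have hA := pvOuter (PySem.Int.floordiv canvas_width ((points.length : Int) + 1))
      (PySem.Int.floordiv canvas_height ((points.length : Int) + 1)) canvas_width
      (points.length : Int) hN points.length
  have hmin : min ((points.length : Int)) (pvTri points.length) = (points.length : Int) :=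
    min_eq_left (pvTri_ge points.length)
  rw [hmin] at hA
  have e1 : arrange_pyramid_points points canvas_width canvas_height =
      List.map (pvQ (PySem.Int.floordiv canvas_width ((points.length : Int) + 1))
        (PySem.Int.floordiv canvas_height ((points.length : Int) + 1)) canvas_width)
        (PySem.List.pyRange 0 (points.length : Int) 1) := congrArg Prod.fst hA
  have e2 : arrange_pyramid_points_alt points canvas_width canvas_height =
      List.map (pvQ (PySem.Int.floordiv canvas_width ((points.length : Int) + 1))
        (PySem.Int.floordiv canvas_height ((points.length : Int) + 1)) canvas_width)
        (PySem.List.pyRange 0 (points.length : Int) 1) :=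
    PySem.List.foldl_append_singleton_eq_map
      (pvQ (PySem.Int.floordiv canvas_width ((points.length : Int) + 1))
        (PySem.Int.floordiv canvas_height ((points.length : Int) + 1)) canvas_width)
      (PySem.List.pyRange 0 (points.length : Int) 1) []
  exact e1.trans e2.symm
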